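-- pv_equiv track=rewrite | github.com/YashJ02/AAI-6640-DL-Final-Project | src/utils/config.py | flatten_tickers
-- ===== SOURCE A (Python) =====
-- def flatten_tickers(ticker_config: dict[str, list[str]]) -> list[str]:
--     """Flatten sector->tickers mapping while preserving order and uniqueness."""
--     seen: set[str] = set()
--     ordered: list[str] = []
--
--     for _, symbols in ticker_config.items():
--         for symbol in symbols:
--             if symbol not in seen:
--                 seen.add(symbol)
--                 ordered.append(symbol)
--
--     return ordered
-- ===== SOURCE B (Python) =====
-- def flatten_tickers(ticker_config: dict[str, list[str]]) -> list[str]: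
--     """Flatten sector->tickers mapping while preserving order and uniqueness."""
--     flat = [s for symbols in ticker_config.values() for s in symbols]
--     first = {s: i for i, s in reversed(list(enumerate(flat)))}
--     return [s for i, s in enumerate(flat) if first[s] == i]
-- ===== Notes on version B (the rewrite author's own statement) =====
-- stated objective: alternative
-- what changed: Replaces the single stateful pass with a seen-set and membership branch by a positional two-stage algorithm: flatten all values, build a first-occurrence-index map by overwriting a dict while scanning the flat list in reverse, then keep exactly the elements standing at their first-occurrence position.
import Mathlib
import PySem

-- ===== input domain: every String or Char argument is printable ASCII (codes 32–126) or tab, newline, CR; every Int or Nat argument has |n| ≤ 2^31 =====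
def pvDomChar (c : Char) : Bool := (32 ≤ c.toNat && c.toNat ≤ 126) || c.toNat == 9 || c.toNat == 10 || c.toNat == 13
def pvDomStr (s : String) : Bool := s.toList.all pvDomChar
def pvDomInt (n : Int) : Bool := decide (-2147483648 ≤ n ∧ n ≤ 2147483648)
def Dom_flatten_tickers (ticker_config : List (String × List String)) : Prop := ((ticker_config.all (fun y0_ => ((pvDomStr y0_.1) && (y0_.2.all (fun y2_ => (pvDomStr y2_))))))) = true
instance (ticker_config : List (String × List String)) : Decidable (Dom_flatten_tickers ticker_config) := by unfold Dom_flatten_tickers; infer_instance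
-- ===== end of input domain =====

-- B: positional two-stage algorithm — flatten all values, build a first-occurrence-index dict by reverse overwrite, keep elements at their first position — instead of A's single pass with a mutable seen-set (alternative, same result).


-- ===== PORT A =====
def flatten_tickers (ticker_config : List (String × List String)) : List String :=
  (ticker_config.foldl
    (fun (st : PySem.Set String × List String) item =>
      item.2.foldl
        (fun (st : PySem.Set String × List String) symbol =>
          if PySem.Set.contains st.1 symbol then st
          else (PySem.Set.add st.1 symbol, st.2 ++ [symbol]))
        st)
    (PySem.Set.empty, [])).2

-- ===== PORT B =====
-- Source B's local `flat`
def pvFlat (ticker_config : List (String × List String)) : List String :=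
  ticker_config.flatMap (fun item => item.2)

-- Source B's local `first`: {s: i for i, s in reversed(list(enumerate(flat)))}
def pvFirst (flat : List String) : PySem.Dict String Int :=
  (PySem.List.enumerate flat).reverse.foldl
    (fun d p => PySem.Dict.insert d p.2 p.1) PySem.Dict.empty

-- `first[s]` never raises (every s of flat is a key), so getD is exact here
def flatten_tickers_alt (ticker_config : List (String × List String)) : List String :=
  ((PySem.List.enumerate (pvFlat ticker_config)).filter
    (fun p => decide (PySem.Dict.getD (pvFirst (pvFlat ticker_config)) p.2 0 = p.1))).map (·.2)

-- ===== PRECONDITION & SPEC =====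
def Spec_flatten_tickers (ticker_config : List (String × List String)) (out : List String) : Prop := out = flatten_tickers_alt ticker_config
instance (ticker_config : List (String × List String)) (out : List String) : Decidable (Spec_flatten_tickers ticker_config out) := by unfold Spec_flatten_tickers; infer_instance

-- ===== CLAIM (what is proved, stated in full; the proofs are below) =====
def Claim_equal_flatten_tickers : Prop := ∀ (ticker_config : List (String × List String)), Dom_flatten_tickers ticker_config → Spec_flatten_tickers ticker_config (flatten_tickers ticker_config)

-- ===== LEMMAS AND PROOFS =====

-- the fresh elements appended after `seen` by A's seen-set loop
def pvNew (seen l : List String) : List String :=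
  match l with
  | [] => []
  | x :: xs => if x ∈ seen then pvNew seen xs else x :: pvNew (seen ++ [x]) xs

lemma pvNew_congr (s1 s2 l : List String) (h : ∀ a, a ∈ s1 ↔ a ∈ s2) :
    pvNew s1 l = pvNew s2 l := by
  induction l generalizing s1 s2 with
  | nil => rfl
  | cons x xs ih =>
    by_cases hx : x ∈ s1
    · simp [pvNew, hx, (h x).mp hx, ih s1 s2 h]
    · have hx2 : x ∉ s2 := fun hm => hx ((h x).mpr hm)
      simp only [pvNew, hx, hx2, if_neg, not_false_iff]
      simp only [List.cons.injEq, true_and]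
      exact ih _ _ (by intro a; simp [h a])

-- A's inner loop with seen = ordered is folding Set.add
lemma inner_loop_eq (symbols : List String) (s : PySem.Set String) :
    symbols.foldl
      (fun (st : PySem.Set String × List String) symbol =>
        if PySem.Set.contains st.1 symbol then st
        else (PySem.Set.add st.1 symbol, st.2 ++ [symbol]))
      (s, s)
    = (symbols.foldl PySem.Set.add s, symbols.foldl PySem.Set.add s) := by
  induction symbols generalizing s with
  | nil => rfl
  | cons x xs ih =>
    simp only [List.foldl_cons]
    by_cases h : x ∈ s
    · simpa [PySem.Set.contains, PySem.Set.add, h] using ih s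
    · simpa [PySem.Set.contains, PySem.Set.add, h] using ih (s ++ [x])

lemma outer_loop_eq (tc : List (String × List String)) (s : PySem.Set String) :
    tc.foldl
      (fun (st : PySem.Set String × List String) item =>
        item.2.foldl
          (fun (st : PySem.Set String × List String) symbol =>
            if PySem.Set.contains st.1 symbol then st
            else (PySem.Set.add st.1 symbol, st.2 ++ [symbol]))
          st)
      (s, s)
    = ((tc.flatMap (fun item => item.2)).foldl PySem.Set.add s,
       (tc.flatMap (fun item => item.2)).foldl PySem.Set.add s) := by
  induction tc generalizing s with
  | nil => rfl
  | cons p ps ih =>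
    simp only [List.foldl_cons, List.flatMap_cons, List.foldl_append]
    rw [inner_loop_eq]
    exact ih _

lemma foldl_add_eq_pvNew (l seen : List String) :
    l.foldl PySem.Set.add seen = seen ++ pvNew seen l := by
  induction l generalizing seen with
  | nil => simp [pvNew]
  | cons x xs ih =>
    by_cases h : x ∈ seen
    · simp [pvNew, h, PySem.Set.add, ih]
    · simp [pvNew, h, PySem.Set.add, ih (seen ++ [x])]

-- B's positional prefix filter computes the same fresh elements
lemma filter_enum_eq_pvNew (l pre : List String) :
    ((PySem.List.enumerate l (pre.length : Int)).filter
      (fun p => decide (p.2 ∉ PySem.List.slice (pre ++ l) none (some p.1)))).map (·.2)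
    = pvNew pre l := by
  induction l generalizing pre with
  | nil => simp [PySem.List.enumerate, pvNew]
  | cons x xs ih =>
    rw [PySem.List.enumerate_cons]
    have hsl : PySem.List.slice (pre ++ x :: xs) none (some ((pre.length : Nat) : Int))
        = pre := by
      rw [PySem.List.slice_to_natCast]
      simp
    have hrest : ((pre.length : Int) + 1) = ((pre ++ [x]).length : Int) := by
      simp
    have hassoc : pre ++ x :: xs = (pre ++ [x]) ++ xs := by simp
    by_cases h : x ∈ pre
    · simp only [List.filter_cons, hsl, h, not_true_eq_false, decide_false,
        Bool.false_eq_true, if_false]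
      rw [hrest, hassoc, ih (pre ++ [x])]
      have := pvNew_congr (pre ++ [x]) pre xs (by
        intro a
        simp only [List.mem_append, List.mem_singleton]
        constructor
        · rintro (ha | rfl)
          · exact ha
          · exact h
        · exact Or.inl)
      simp [pvNew, h, this]
    · simp only [List.filter_cons, hsl, h, not_false_iff, decide_true, if_true,
        List.map_cons]
      rw [hrest, hassoc, ih (pre ++ [x])]
      simp [pvNew, h]

-- the reverse-overwrite dict maps each symbol to its first index (shifted by the start k)
lemma get?_pvFirst (l : List String) (k : Int) (s : String) :
    PySem.Dict.get? ((PySem.List.enumerate l k).reverse.foldl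
      (fun d p => PySem.Dict.insert d p.2 p.1) PySem.Dict.empty) s
    = (PySem.List.index? l s).map (fun i => k + (i : Int)) := by
  induction l generalizing k with
  | nil => simp [PySem.List.enumerate, PySem.Dict.get?, PySem.Dict.empty, PySem.List.index?]
  | cons x xs ih =>
    rw [PySem.List.enumerate_cons]
    simp only [List.reverse_cons, List.foldl_append, List.foldl_cons, List.foldl_nil]
    by_cases hs : s = x
    · subst hs
      rw [PySem.Dict.get?_insert_self]
      simp [PySem.List.index?, List.idxOf?_cons]
    · rw [PySem.Dict.get?_insert_of_ne _ _ hs, ih (k + 1)]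
      simp only [PySem.List.index?, List.idxOf?_cons, beq_iff_eq, Ne.symm hs, if_false]
      cases List.idxOf? s xs with
      | none => rfl
      | some i =>
        simp
        ring

lemma pvMem_enumerate (xs : List String) (k : Int) (p : Int × String)
    (hp : p ∈ PySem.List.enumerate xs k) :
    ∃ j : Nat, ∃ _ : j < xs.length, p.1 = k + (j : Int) ∧ p.2 = xs[j] := by
  induction xs generalizing k with
  | nil => simp [PySem.List.enumerate] at hp
  | cons x xs ih =>
    rw [PySem.List.enumerate_cons] at hp
    rcases List.mem_cons.mp hp with h | h
    · exact ⟨0, by simp, by simp [h], by simp [h]⟩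
    · obtain ⟨j, hj, h1, h2⟩ := ih (k + 1) h
      exact ⟨j + 1, by simp only [List.length_cons]; omega, by push_cast [h1]; ring,
        by rw [h2]; rfl⟩

-- on elements of enumerate flat, B's dict condition is the prefix-membership condition
lemma cond_eq (flat : List String) (p : Int × String) (hp : p ∈ PySem.List.enumerate flat 0) :
    decide (PySem.Dict.getD (pvFirst flat) p.2 0 = p.1)
    = decide (p.2 ∉ PySem.List.slice flat none (some p.1)) := by
  obtain ⟨j, hj, h1, h2⟩ := pvMem_enumerate flat 0 p hp
  have hmem : p.2 ∈ flat := h2 ▸ List.getElem_mem hj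
  obtain ⟨i0, hi0⟩ : ∃ i0, List.idxOf? p.2 flat = some i0 := by
    cases hfind : List.idxOf? p.2 flat with
    | none => exact absurd (List.idxOf?_eq_none_iff.mp hfind) (not_not_intro hmem)
    | some i0 => exact ⟨i0, rfl⟩
  obtain ⟨hi0len, hi0get, hi0min⟩ := List.idxOf?_eq_some_iff.mp hi0
  have hgd : PySem.Dict.getD (pvFirst flat) p.2 0 = (i0 : Int) := by
    unfold pvFirst
    rw [PySem.Dict.getD, get?_pvFirst, PySem.List.index?, hi0]
    simp
  have hsl : PySem.List.slice flat none (some p.1) = flat.take j := by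
    rw [h1]
    simp [PySem.List.slice_to_natCast flat j]
  rw [hgd, hsl, h1]
  refine decide_eq_decide.mpr ?_
  constructor
  · intro hij hmemt
    have hij' : i0 = j := by omega
    obtain ⟨m, hm, hmg⟩ := List.mem_iff_getElem.mp hmemt
    have hmlt : m < j := by
      rw [List.length_take] at hm
      omega
    have hfm : flat[m] = p.2 := by
      rw [← hmg, List.getElem_take]
    exact hi0min m (by omega) hfm
  · intro hnot
    have hij : ¬ i0 < j := by
      intro hlt
      apply hnot
      have h1' : i0 < (flat.take j).length := by
        rw [List.length_take]
        omega
      have h2' : (flat.take j)[i0] = flat[i0] := List.getElem_take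
      rw [← hi0get, ← h2']
      exact List.getElem_mem h1'
    have hji : ¬ j < i0 := fun hlt => hi0min j hlt h2.symm
    omega

-- ===== VERDICT (by name: the statement is the Claim_ definition above) =====
theorem flatten_tickers_spec : Claim_equal_flatten_tickers := by
  intro tc _
  unfold Spec_flatten_tickers flatten_tickers flatten_tickers_alt pvFlat
  rw [show (PySem.Set.empty : PySem.Set String) = ([] : List String) from rfl]
  rw [outer_loop_eq]
  rw [List.filter_congr (fun p hp => cond_eq (tc.flatMap (fun item => item.2)) p hp)]
  have hB := filter_enum_eq_pvNew (tc.flatMap (fun item => item.2)) []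
  simp only [List.nil_append, List.length_nil, Nat.cast_zero] at hB
  simp only [foldl_add_eq_pvNew, List.nil_append]
  exact hB.symm
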